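-- pv_equiv track=rewrite | github.com/frverlser/cs101_projects | week6assignment.py | get_regional_sales_total
-- ===== SOURCE A (Python) =====
-- def get_regional_sales_total(sales_data):
--     region_total = []
--
--     for employee_id, region, sales_list in sales_data:
--         total_sales = 0
--         for sale in sales_list:
--             total_sales += sale
--
--         found = False
--         for i in range(len(region_total)):
--             if region_total[i][0] == region:
--                 region_total[i][1] += total_sales
--                 found = True
--                 break
--
--         if not found:
--             region_total.append([region, total_sales])
--     n = len(region_total)
--     for i in range(n):
--         for j in range(0, n - i - 1):
--             if region_total[j][0] > region_total[j + 1][0]: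
--                 region_total[j], region_total[j + 1] = region_total[j + 1], region_total[j]
--     result = []
--     for item in region_total:
--         result.append((item[0], item[1]))
--
--     return result
-- ===== SOURCE B (Python) =====
-- def get_regional_sales_total(sales_data):
--     ordered = sorted(sales_data, key=lambda rec: rec[1])
--     result = []
--     i = 0
--     n = len(ordered)
--     while i < n:
--         region = ordered[i][1]
--         total = 0
--         while i < n and ordered[i][1] == region:
--             total += sum(ordered[i][2])
--             i += 1
--         result.append((region, total))
--     return result
-- ===== Notes on version B (the rewrite author's own statement) =====
-- stated objective: faster
-- what changed: Replaces A's scan-the-result-list aggregation followed by a hand-written bubble sort with a sort of the records by region and a single linear merge pass over each run of equal regions.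
import Mathlib
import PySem

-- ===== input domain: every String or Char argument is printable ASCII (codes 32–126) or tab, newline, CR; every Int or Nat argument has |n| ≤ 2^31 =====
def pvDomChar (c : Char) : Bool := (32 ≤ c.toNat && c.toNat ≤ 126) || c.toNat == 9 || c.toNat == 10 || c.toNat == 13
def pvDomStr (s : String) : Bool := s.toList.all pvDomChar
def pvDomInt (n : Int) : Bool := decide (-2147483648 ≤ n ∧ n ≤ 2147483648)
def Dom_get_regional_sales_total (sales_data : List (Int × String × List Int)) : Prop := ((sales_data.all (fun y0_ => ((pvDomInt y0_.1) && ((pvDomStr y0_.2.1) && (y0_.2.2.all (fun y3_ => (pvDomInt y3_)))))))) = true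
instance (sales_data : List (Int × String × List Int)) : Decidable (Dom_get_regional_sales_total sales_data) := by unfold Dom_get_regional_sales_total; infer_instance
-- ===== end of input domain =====

-- B sorts a copy of the records by region and merges each run of equal regions in one linear pass,
-- instead of A's scan-the-result-list aggregation followed by a bubble sort (measured faster in a timing run).

-- ===== PORT A =====
-- A's inner found-loop: add total to the FIRST entry whose key matches; returns (new list, found)
def pvUpdA : List (String × Int) → String → Int → (List (String × Int) × Bool)
  | [], _, _ => ([], false)
  | p :: rest, r, t =>
    if p.1 == r then ((p.1, p.2 + t) :: rest, true)
    else
      let q := pvUpdA rest r t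
      (p :: q.1, q.2)

-- one record of A's aggregation loop
def pvStepA (rt : List (String × Int)) (rec : Int × String × List Int) : List (String × Int) :=
  let total_sales : Int := rec.2.2.foldl (fun t s => t + s) 0
  let q := pvUpdA rt rec.2.1 total_sales
  if q.2 then q.1 else q.1 ++ [(rec.2.1, total_sales)]

-- inner j-loop of A's bubble sort: m adjacent compare-swaps, left to right
def pvPassA : Nat → List (String × Int) → List (String × Int)
  | 0, l => l
  | _ + 1, [] => []
  | _ + 1, [a] => [a]
  | m + 1, a :: b :: t => if b.1 < a.1 then b :: pvPassA m (a :: t) else a :: pvPassA m (b :: t)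

def get_regional_sales_total (sales_data : List (Int × String × List Int)) : List (String × Int) :=
  let region_total : List (String × Int) := sales_data.foldl pvStepA []
  let n := region_total.length
  let region_total := (List.range n).foldl (fun l i => pvPassA (n - i - 1) l) region_total
  region_total.foldl (fun res item => res ++ [(item.1, item.2)]) []

-- ===== PORT B =====
-- B's inner while loop: accumulate totals of the leading records whose region is r; returns (total, rest)
def pvInnerB (r : String) (total : Int) : List (Int × String × List Int) → Int × List (Int × String × List Int)
  | [] => (total, [])
  | x :: xs => if x.2.1 == r then pvInnerB r (total + x.2.2.sum) xs else (total, x :: xs)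

theorem pvInnerB_len_le (r : String) (t : Int) (l : List (Int × String × List Int)) :
    (pvInnerB r t l).2.length ≤ l.length := by
  induction l generalizing t with
  | nil => simp [pvInnerB]
  | cons x xs ih =>
    simp only [pvInnerB]
    split
    · exact (ih _).trans (Nat.le_succ _)
    · simp

-- B's outer while loop over the region-sorted records
def pvOuterB : List (Int × String × List Int) → List (String × Int)
  | [] => []
  | x :: xs =>
    (x.2.1, (pvInnerB x.2.1 0 (x :: xs)).1) :: pvOuterB (pvInnerB x.2.1 0 (x :: xs)).2
termination_by l => l.length
decreasing_by
  simp only [pvInnerB, BEq.rfl, if_true, List.length_cons]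
  exact Nat.lt_succ_of_le (pvInnerB_len_le _ _ _)

def get_regional_sales_total_alt (sales_data : List (Int × String × List Int)) : List (String × Int) :=
  pvOuterB (PySem.List.sorted sales_data (fun rec => rec.2.1) false)

-- ===== PRECONDITION & SPEC =====
def Spec_get_regional_sales_total (sales_data : List (Int × String × List Int)) (out : List (String × Int)) : Prop := out = get_regional_sales_total_alt sales_data
instance (sales_data : List (Int × String × List Int)) (out : List (String × Int)) : Decidable (Spec_get_regional_sales_total sales_data out) := by unfold Spec_get_regional_sales_total; infer_instance

-- ===== CLAIM (what is proved, stated in full; the proofs are below) =====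
def Claim_equal_get_regional_sales_total : Prop := ∀ (sales_data : List (Int × String × List Int)), Dom_get_regional_sales_total sales_data → Spec_get_regional_sales_total sales_data (get_regional_sales_total sales_data)

-- ===== LEMMAS AND PROOFS =====

-- the multiset-level meaning both programs compute: regions, and the total per region
def pvRegs (sd : List (Int × String × List Int)) : List String := sd.map (fun rec => rec.2.1)

def pvTot (sd : List (Int × String × List Int)) (r : String) : Int :=
  (sd.map (fun rec => if rec.2.1 = r then rec.2.2.sum else 0)).sum

theorem pvTot_append (s t : List (Int × String × List Int)) (r : String) :
    pvTot (s ++ t) r = pvTot s r + pvTot t r := by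
  simp [pvTot]

theorem pvTot_eq_zero (sd : List (Int × String × List Int)) (r : String)
    (h : r ∉ pvRegs sd) : pvTot sd r = 0 := by
  induction sd with
  | nil => simp [pvTot]
  | cons x xs ih =>
    simp only [pvRegs, List.map_cons, List.mem_cons, not_or] at h
    simp only [pvTot, List.map_cons, List.sum_cons]
    rw [if_neg (fun hx => h.1 hx.symm)]
    simpa [pvTot] using ih h.2

theorem pvTot_perm (sd sd' : List (Int × String × List Int)) (h : sd.Perm sd') (r : String) :
    pvTot sd r = pvTot sd' r := by
  exact List.Perm.sum_eq (h.map _)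

theorem pvTot_all_match (g : List (Int × String × List Int)) (r : String)
    (h : ∀ a ∈ g, a.2.1 = r) : pvTot g r = (g.map (fun a => a.2.2.sum)).sum := by
  induction g with
  | nil => rfl
  | cons a g ih =>
    simp only [pvTot, List.map_cons, List.sum_cons] at *
    rw [if_pos (h a (List.mem_cons_self ..)), ih (fun b hb => h b (List.mem_cons_of_mem _ hb))]

theorem pvTot_single (rec : Int × String × List Int) (r : String) :
    pvTot [rec] r = if rec.2.1 = r then rec.2.2.sum else 0 := by
  simp [pvTot]

-- ---------- A side: the aggregation ----------
def pvInvA (sd : List (Int × String × List Int)) (acc : List (String × Int)) : Prop :=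
  (acc.map Prod.fst).Nodup ∧ (∀ r, r ∈ acc.map Prod.fst ↔ r ∈ pvRegs sd) ∧
    (∀ x ∈ acc, x.2 = pvTot sd x.1)

theorem pvUpdA_not_found (acc : List (String × Int)) (r : String) (t : Int)
    (h : ∀ p ∈ acc, p.1 ≠ r) : pvUpdA acc r t = (acc, false) := by
  induction acc with
  | nil => rfl
  | cons p rest ih =>
    have hp : ¬ (p.1 == r) = true := by
      simpa using h p (List.mem_cons_self ..)
    simp [pvUpdA, hp, ih (fun q hq => h q (List.mem_cons_of_mem _ hq))]

theorem pvUpdA_found (pre post : List (String × Int)) (r : String) (v t : Int)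
    (h : ∀ p ∈ pre, p.1 ≠ r) :
    pvUpdA (pre ++ (r, v) :: post) r t = (pre ++ (r, v + t) :: post, true) := by
  induction pre with
  | nil => simp [pvUpdA]
  | cons p rest ih =>
    have hp : ¬ (p.1 == r) = true := by
      simpa using h p (List.mem_cons_self ..)
    simp [pvUpdA, hp, ih (fun q hq => h q (List.mem_cons_of_mem _ hq))]

theorem pvFirstSplit (acc : List (String × Int)) (r : String)
    (h : r ∈ acc.map Prod.fst) :
    ∃ pre v post, acc = pre ++ (r, v) :: post ∧ ∀ p ∈ pre, p.1 ≠ r := by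
  induction acc with
  | nil => simp at h
  | cons p rest ih =>
    by_cases hp : p.1 = r
    · exact ⟨[], p.2, rest, by simp [← hp], by simp⟩
    · have hr : r ∈ rest.map Prod.fst := by
        have h2 : r = p.1 ∨ ∃ x, (r, x) ∈ rest := by simpa using h
        rcases h2 with h' | ⟨x, h'⟩
        · exact absurd h'.symm hp
        · simpa using ⟨x, h'⟩
      obtain ⟨pre, v, post, heq, hpre⟩ := ih hr
      exact ⟨p :: pre, v, post, by simp [heq], by
        intro q hq
        rcases List.mem_cons.mp hq with h' | h'
        · simpa [h'] using hp
        · exact hpre q h'⟩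

theorem pvInvA_step (sd : List (Int × String × List Int)) (acc : List (String × Int))
    (rec : Int × String × List Int) (h : pvInvA sd acc) :
    pvInvA (sd ++ [rec]) (pvStepA acc rec) := by
  obtain ⟨hnd, hkeys, hval⟩ := h
  have htot : rec.2.2.foldl (fun t s => t + s) 0 = rec.2.2.sum := by
    simpa using PySem.List.foldl_add (fun s => s) (l := rec.2.2) (a := 0)
  have hregs : pvRegs (sd ++ [rec]) = pvRegs sd ++ [rec.2.1] := by simp [pvRegs]
  by_cases hmem : rec.2.1 ∈ acc.map Prod.fst
  · obtain ⟨pre, v, post, heq, hpre⟩ := pvFirstSplit acc rec.2.1 hmem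
    have hL : pvStepA acc rec =
        pre ++ (rec.2.1, v + rec.2.2.foldl (fun t s => t + s) 0) :: post := by
      simp only [pvStepA, heq, pvUpdA_found pre post rec.2.1 v _ hpre, if_true]
    have hndpost : rec.2.1 ∉ post.map Prod.fst := by
      rw [heq] at hnd
      simp only [List.map_append, List.map_cons] at hnd
      have h2 : (rec.2.1 :: post.map Prod.fst).Nodup :=
        hnd.sublist (List.sublist_append_right _ _)
      exact (List.nodup_cons.mp h2).1
    have hkeysL : (pvStepA acc rec).map Prod.fst = acc.map Prod.fst := by
      rw [hL, heq]; simp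
    refine ⟨?_, ?_, ?_⟩
    · rw [hkeysL]; exact hnd
    · intro r'
      rw [hkeysL, hregs, List.mem_append]
      constructor
      · intro h'; exact Or.inl ((hkeys r').mp h')
      · rintro (h' | h')
        · exact (hkeys r').mpr h'
        · simp only [List.mem_singleton] at h'
          exact h' ▸ hmem
    · intro x hx
      rw [hL] at hx
      have hvv : v = pvTot sd rec.2.1 := hval (rec.2.1, v) (by rw [heq]; simp)
      rcases List.mem_append.mp hx with h1 | h1
      · have hxa : x ∈ acc := by rw [heq]; exact List.mem_append.mpr (Or.inl h1)
        have hne : x.1 ≠ rec.2.1 := hpre x h1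
        rw [pvTot_append, pvTot_single, if_neg (fun h2 => hne h2.symm), add_zero]
        exact hval x hxa
      rcases List.mem_cons.mp h1 with h2 | h2
      · rw [h2]
        simp only
        rw [pvTot_append, pvTot_single, if_pos rfl, htot, hvv]
      · have hxa : x ∈ acc := by rw [heq]; simp [h2]
        have hne : x.1 ≠ rec.2.1 := by
          intro h3
          exact hndpost (h3 ▸ List.mem_map_of_mem h2)
        rw [pvTot_append, pvTot_single, if_neg (fun h2 => hne h2.symm), add_zero]
        exact hval x hxa
  · have hnf : ∀ p ∈ acc, p.1 ≠ rec.2.1 := by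
      intro p hp h'
      exact hmem (h' ▸ List.mem_map_of_mem hp)
    have hL : pvStepA acc rec = acc ++ [(rec.2.1, rec.2.2.foldl (fun t s => t + s) 0)] := by
      simp only [pvStepA, pvUpdA_not_found acc rec.2.1 _ hnf, if_false, Bool.false_eq_true]
    have hnr : rec.2.1 ∉ pvRegs sd := fun h' => hmem ((hkeys rec.2.1).mpr h')
    refine ⟨?_, ?_, ?_⟩
    · rw [hL]
      simp only [List.map_append, List.map_cons, List.map_nil]
      rw [List.nodup_append]
      exact ⟨hnd, List.nodup_singleton _,
        fun x hx y hy he => hmem ((List.mem_singleton.mp hy) ▸ he ▸ hx)⟩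
    · intro r'
      rw [hL, hregs]
      simp only [List.map_append, List.map_cons, List.map_nil, List.mem_append,
        List.mem_cons, List.not_mem_nil, or_false]
      exact or_congr_left (hkeys r')
    · intro x hx
      rw [hL] at hx
      rcases List.mem_append.mp hx with h1 | h1
      · have hne : x.1 ≠ rec.2.1 := hnf x h1
        rw [pvTot_append, pvTot_single, if_neg (fun h2 => hne h2.symm), add_zero]
        exact hval x h1
      · simp only [List.mem_singleton] at h1
        rw [h1]
        simp only
        rw [pvTot_append, pvTot_single, if_pos rfl, htot, pvTot_eq_zero sd _ hnr, zero_add]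

theorem pvInvA_agg (sd : List (Int × String × List Int)) :
    pvInvA sd (sd.foldl pvStepA []) := by
  induction sd using List.reverseRecOn with
  | nil => exact ⟨List.nodup_nil, by simp [pvRegs], by simp⟩
  | append_singleton sd rec ih =>
    rw [List.foldl_append]
    exact pvInvA_step sd _ rec ih

-- ---------- A side: the bubble sort ----------
def pvBubAux : Nat → List (String × Int) → List (String × Int)
  | 0, l => l
  | k + 1, l => pvBubAux k (pvPassA k l)

theorem pvRangeFold_eq_bubAux (n : Nat) (l : List (String × Int)) :
    (List.range n).foldl (fun l i => pvPassA (n - i - 1) l) l = pvBubAux n l := by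
  induction n generalizing l with
  | zero => rfl
  | succ n ih =>
    rw [List.range_succ_eq_map]
    simp only [List.foldl_cons, List.foldl_map]
    have he : (fun (x : List (String × Int)) (y : Nat) => pvPassA (n + 1 - y.succ - 1) x)
        = fun x y => pvPassA (n - y - 1) x := by
      funext x y
      congr 1
      omega
    have h0 : n + 1 - 0 - 1 = n := by omega
    rw [he, h0]
    exact ih (pvPassA n l)

theorem pvPassA_perm (m : Nat) (l : List (String × Int)) : (pvPassA m l).Perm l := by
  induction m generalizing l with
  | zero => simp [pvPassA]
  | succ m ih =>
    match l with
    | [] => simp [pvPassA]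
    | [a] => simp [pvPassA]
    | a :: b :: t =>
      simp only [pvPassA]
      split
      · exact ((ih (a :: t)).cons b).trans (List.Perm.swap a b t)
      · exact (ih (b :: t)).cons a

theorem pvPassA_prefix (m : Nat) (u v : List (String × Int)) (h : u.length = m + 1) :
    pvPassA m (u ++ v) = pvPassA m u ++ v := by
  induction m generalizing u with
  | zero => simp [pvPassA]
  | succ m ih =>
    match u, h with
    | [a], h => simp at h
    | a :: b :: t, h =>
      simp only [List.cons_append, pvPassA]
      split
      · rw [← List.cons_append, ih (a :: t) (by simpa using h)]; rfl
      · rw [← List.cons_append, ih (b :: t) (by simpa using h)]; rfl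

theorem pvPassA_max (m : Nat) (u : List (String × Int)) (h : u.length = m + 1) :
    ∃ w x, pvPassA m u = w ++ [x] ∧ ∀ y ∈ u, y.1 ≤ x.1 := by
  induction m generalizing u with
  | zero =>
    match u, h with
    | [a], _ => exact ⟨[], a, rfl, by simp⟩
  | succ m ih =>
    match u, h with
    | [a], h => simp at h
    | a :: b :: t, h =>
      simp only [pvPassA]
      split
      · obtain ⟨w, x, heq, hmax⟩ := ih (a :: t) (by simpa using h)
        refine ⟨b :: w, x, by simp [heq], ?_⟩
        intro y hy
        rcases List.mem_cons.mp hy with h1 | h1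
        · exact h1 ▸ hmax a (List.mem_cons_self ..)
        rcases List.mem_cons.mp h1 with h2 | h2
        · exact h2 ▸ le_of_lt (lt_of_lt_of_le (by assumption) (hmax a (List.mem_cons_self ..)))
        · exact hmax y (List.mem_cons_of_mem _ h2)
      · obtain ⟨w, x, heq, hmax⟩ := ih (b :: t) (by simpa using h)
        refine ⟨a :: w, x, by simp [heq], ?_⟩
        intro y hy
        rcases List.mem_cons.mp hy with h1 | h1
        · exact h1 ▸ le_trans (not_lt.mp (by assumption)) (hmax b (List.mem_cons_self ..))
        · exact hmax y h1

theorem pvBubAux_sorts (k : Nat) (u v : List (String × Int)) (hu : u.length = k)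
    (hv : v.Pairwise (fun a b => a.1 ≤ b.1))
    (hc : ∀ a ∈ u, ∀ b ∈ v, a.1 ≤ b.1) :
    (pvBubAux k (u ++ v)).Perm (u ++ v) ∧
      (pvBubAux k (u ++ v)).Pairwise (fun a b => a.1 ≤ b.1) := by
  induction k generalizing u v with
  | zero =>
    match u, hu with
    | [], _ => exact ⟨by simp [pvBubAux], by simpa [pvBubAux] using hv⟩
  | succ k ih =>
    obtain ⟨w, x, heq, hmax⟩ := pvPassA_max k u hu
    have hperm : (w ++ [x]).Perm u := heq ▸ pvPassA_perm k u
    have hwlen : w.length = k := by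
      have := hperm.length_eq
      simp only [List.length_append, List.length_singleton] at this
      omega
    have hxu : x ∈ u := hperm.mem_iff.mp (by simp)
    have hwu : ∀ a ∈ w, a ∈ u := fun a ha => hperm.mem_iff.mp (by simp [ha])
    have hv' : (x :: v).Pairwise (fun a b => a.1 ≤ b.1) :=
      List.pairwise_cons.mpr ⟨fun b hb => hc x hxu b hb, hv⟩
    have hc' : ∀ a ∈ w, ∀ b ∈ x :: v, a.1 ≤ b.1 := by
      intro a ha b hb
      rcases List.mem_cons.mp hb with h1 | h1
      · exact h1 ▸ hmax a (hwu a ha)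
      · exact hc a (hwu a ha) b h1
    have hstep : pvBubAux (k + 1) (u ++ v) = pvBubAux k (w ++ x :: v) := by
      show pvBubAux k (pvPassA k (u ++ v)) = _
      rw [pvPassA_prefix k u v hu, heq, List.append_assoc]
      rfl
    obtain ⟨hperm', hsorted'⟩ := ih w (x :: v) hwlen hv' hc'
    refine ⟨?_, hstep ▸ hsorted'⟩
    rw [hstep]
    refine hperm'.trans ?_
    have : w ++ x :: v = (w ++ [x]) ++ v := by simp
    rw [this]
    exact hperm.append_right v

-- A's result: a permutation of the aggregation list, sorted by key
theorem pvA_char (sd : List (Int × String × List Int)) :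
    (get_regional_sales_total sd).Perm (sd.foldl pvStepA []) ∧
      (get_regional_sales_total sd).Pairwise (fun a b => a.1 ≤ b.1) := by
  have hb := pvBubAux_sorts (sd.foldl pvStepA []).length (sd.foldl pvStepA []) [] rfl
    List.Pairwise.nil (by simp)
  simp only [List.append_nil] at hb
  have hA : get_regional_sales_total sd =
      pvBubAux (sd.foldl pvStepA []).length (sd.foldl pvStepA []) := by
    unfold get_regional_sales_total
    simp only [pvRangeFold_eq_bubAux, Prod.mk.eta,
      PySem.List.foldl_append_singleton_eq_self, List.nil_append]
  rw [hA]
  exact hb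

-- ---------- B side ----------
theorem pvInnerB_spec (r : String) (t : Int) (l : List (Int × String × List Int)) :
    pvInnerB r t l =
      (t + ((l.takeWhile (fun rec => rec.2.1 == r)).map (fun rec => rec.2.2.sum)).sum,
        l.dropWhile (fun rec => rec.2.1 == r)) := by
  induction l generalizing t with
  | nil => simp [pvInnerB]
  | cons x xs ih =>
    by_cases hx : (x.2.1 == r) = true
    · simp only [pvInnerB, hx, if_true, List.takeWhile_cons, List.dropWhile_cons, ih]
      simp [add_assoc]
    · simp [pvInnerB, hx]

theorem pvOuterB_go (n : Nat) : ∀ l : List (Int × String × List Int), l.length ≤ n →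
    l.Pairwise (fun a b => a.2.1 ≤ b.2.1) →
    (pvOuterB l).Pairwise (fun a b => a.1 < b.1) ∧
      (∀ x, x ∈ pvOuterB l ↔ (x.1 ∈ pvRegs l ∧ x.2 = pvTot l x.1)) := by
  induction n with
  | zero =>
    intro l hl _
    match l, hl with
    | [], _ => exact ⟨by simp [pvOuterB], by simp [pvOuterB, pvRegs]⟩
  | succ n ih =>
    intro l hl hp
    match l with
    | [] => exact ⟨by simp [pvOuterB], by simp [pvOuterB, pvRegs]⟩
    | x :: xs =>
      obtain ⟨hxall, hxs⟩ := List.pairwise_cons.mp hp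
      have hspec := pvInnerB_spec x.2.1 0 (x :: xs)
      have hxr : (x.2.1 == x.2.1) = true := by simp
      have hgrp : (x :: xs).takeWhile (fun rec => rec.2.1 == x.2.1)
          = x :: xs.takeWhile (fun rec => rec.2.1 == x.2.1) := by
        rw [List.takeWhile_cons, if_pos hxr]
      have hrest : (x :: xs).dropWhile (fun rec => rec.2.1 == x.2.1)
          = xs.dropWhile (fun rec => rec.2.1 == x.2.1) := by
        rw [List.dropWhile_cons, if_pos hxr]
      set grp := (x :: xs).takeWhile (fun rec => rec.2.1 == x.2.1) with hgrpdef
      set rest := (x :: xs).dropWhile (fun rec => rec.2.1 == x.2.1) with hrestdef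
      have hsplit : grp ++ rest = x :: xs := List.takeWhile_append_dropWhile
      have hgrpmatch : ∀ a ∈ grp, a.2.1 = x.2.1 := by
        intro a ha
        simpa using List.mem_takeWhile_imp ha
      have hrestsub : rest.Sublist xs := hrest ▸ List.dropWhile_sublist _
      have hrestpw : rest.Pairwise (fun a b => a.2.1 ≤ b.2.1) := hxs.sublist hrestsub
      have hstrict : ∀ b ∈ rest, x.2.1 < b.2.1 := by
        match hr : rest with
        | [] => simp
        | h0 :: rest' =>
          have hne : (h0.2.1 == x.2.1) = false := by
            have hne' : xs.dropWhile (fun rec => rec.2.1 == x.2.1) ≠ [] := by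
              rw [← hrest, hr]; simp
            have h2 := List.head_dropWhile_not
              (fun rec : Int × String × List Int => rec.2.1 == x.2.1) hne'
            rwa [show (xs.dropWhile (fun rec => rec.2.1 == x.2.1)).head hne' = h0 from by
              rw [List.head_eq_iff_head?_eq_some, ← hrest, hr]; rfl] at h2
          have hne2 : h0.2.1 ≠ x.2.1 := by simpa using hne
          have hh0 : x.2.1 < h0.2.1 :=
            lt_of_le_of_ne (hxall h0 (hrestsub.mem (by rw [hr]; simp [List.mem_cons]))) (Ne.symm hne2)
          intro b hb
          rcases List.mem_cons.mp hb with h1 | h1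
          · exact h1 ▸ hh0
          · exact lt_of_lt_of_le hh0 ((List.pairwise_cons.mp (hr ▸ hrestpw)).1 b h1)
      have hlen : rest.length ≤ n := by
        have h1 := hrestsub.length_le
        simp only [List.length_cons] at hl
        omega
      obtain ⟨ihlt, ihmem⟩ := ih rest hlen hrestpw
      have hout : pvOuterB (x :: xs)
          = (x.2.1, pvTot (x :: xs) x.2.1) :: pvOuterB rest := by
        rw [pvOuterB, hspec]
        congr 1
        simp only [zero_add]
        congr 1
        rw [← hsplit, pvTot_append, pvTot_all_match grp x.2.1 hgrpmatch,
          pvTot_eq_zero rest x.2.1 (by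
            intro hmem
            obtain ⟨b, hb, hbe⟩ := List.mem_map.mp hmem
            exact absurd hbe (ne_of_gt (hstrict b hb))), add_zero]
      have hregs : pvRegs (x :: xs) = pvRegs grp ++ pvRegs rest := by
        rw [← hsplit]; simp [pvRegs]
      have hregsgrp : ∀ s ∈ pvRegs grp, s = x.2.1 := by
        intro s hs
        obtain ⟨b, hb, hbe⟩ := List.mem_map.mp hs
        exact hbe ▸ hgrpmatch b hb
      have htotrest : ∀ s, x.2.1 < s → pvTot (x :: xs) s = pvTot rest s := by
        intro s hlt
        rw [← hsplit, pvTot_append, pvTot_eq_zero grp s (by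
          intro hmem
          exact absurd (hregsgrp s hmem) (ne_of_gt hlt)), zero_add]
      have hkeyrest : ∀ y ∈ pvOuterB rest, x.2.1 < y.1 := by
        intro y hy
        obtain ⟨hy1, _⟩ := (ihmem y).mp hy
        obtain ⟨b, hb, hbe⟩ := List.mem_map.mp hy1
        exact hbe ▸ hstrict b hb
      rw [hout]
      constructor
      · exact List.pairwise_cons.mpr ⟨hkeyrest, ihlt⟩
      · intro z
        simp only [List.mem_cons]
        constructor
        · rintro (h1 | h1)
          · refine ⟨?_, ?_⟩
            · rw [h1]; simp [pvRegs]
            · rw [h1]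
          · obtain ⟨hz1, hz2⟩ := (ihmem z).mp h1
            have hlt : x.2.1 < z.1 := by
              obtain ⟨b, hb, hbe⟩ := List.mem_map.mp hz1
              exact hbe ▸ hstrict b hb
            refine ⟨?_, ?_⟩
            · rw [hregs]; exact List.mem_append.mpr (Or.inr hz1)
            · rw [htotrest z.1 hlt]; exact hz2
        · rintro ⟨hz1, hz2⟩
          rw [hregs] at hz1
          rcases List.mem_append.mp hz1 with h1 | h1
          · have hz1' : z.1 = x.2.1 := hregsgrp z.1 h1
            left
            have : z = (z.1, z.2) := rfl
            rw [this, hz1', hz2, hz1']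
          · have hlt : x.2.1 < z.1 := by
              obtain ⟨b, hb, hbe⟩ := List.mem_map.mp h1
              exact hbe ▸ hstrict b hb
            right
            exact (ihmem z).mpr ⟨h1, by rw [← htotrest z.1 hlt]; exact hz2⟩

theorem pvOuterB_spec (l : List (Int × String × List Int))
    (h : l.Pairwise (fun a b => a.2.1 ≤ b.2.1)) :
    (pvOuterB l).Pairwise (fun a b => a.1 < b.1) ∧
      (∀ x, x ∈ pvOuterB l ↔ (x.1 ∈ pvRegs l ∧ x.2 = pvTot l x.1)) :=
  pvOuterB_go l.length l le_rfl h

-- ===== VERDICT (by name: the statement is the Claim_ definition above) =====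
theorem get_regional_sales_total_spec : Claim_equal_get_regional_sales_total := by
  intro sd _
  unfold Spec_get_regional_sales_total
  obtain ⟨hAperm, hAle⟩ := pvA_char sd
  obtain ⟨hnd, hkeys, hval⟩ := pvInvA_agg sd
  have hAmem : ∀ x, x ∈ get_regional_sales_total sd ↔
      (x.1 ∈ pvRegs sd ∧ x.2 = pvTot sd x.1) := by
    intro x
    rw [hAperm.mem_iff]
    constructor
    · intro hx
      exact ⟨(hkeys x.1).mp (List.mem_map_of_mem hx), hval x hx⟩
    · rintro ⟨h1, h2⟩
      obtain ⟨y, hy, hy1⟩ := List.mem_map.mp ((hkeys x.1).mpr h1)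
      have hxy : x = y := Prod.ext_iff.mpr ⟨hy1.symm, by
        rw [h2, ← hy1]
        exact (hval y hy).symm⟩
      exact hxy ▸ hy
  have hAndk : ((get_regional_sales_total sd).map Prod.fst).Nodup :=
    (hAperm.map Prod.fst).nodup_iff.mpr hnd
  have hAlt : (get_regional_sales_total sd).Pairwise (fun a b => a.1 < b.1) := by
    have hne : (get_regional_sales_total sd).Pairwise (fun a b => a.1 ≠ b.1) :=
      List.pairwise_map.mp hAndk
    exact (hAle.and hne).imp (fun h => lt_of_le_of_ne h.1 h.2)
  have hsp : (PySem.List.sorted sd (fun rec => rec.2.1) false).Pairwise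
      (fun a b => a.2.1 ≤ b.2.1) := PySem.List.sorted_pairwise sd (fun rec => rec.2.1)
  obtain ⟨hBlt, hBmem⟩ := pvOuterB_spec (PySem.List.sorted sd (fun rec => rec.2.1) false) hsp
  have hperm : (PySem.List.sorted sd (fun rec => rec.2.1) false).Perm sd :=
    PySem.List.sorted_perm sd (fun rec => rec.2.1) false
  have hBmem' : ∀ x, x ∈ get_regional_sales_total_alt sd ↔
      (x.1 ∈ pvRegs sd ∧ x.2 = pvTot sd x.1) := by
    intro x
    rw [show get_regional_sales_total_alt sd
        = pvOuterB (PySem.List.sorted sd (fun rec => rec.2.1) false) from rfl]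
    rw [hBmem x, pvTot_perm _ sd hperm]
    have : x.1 ∈ pvRegs (PySem.List.sorted sd (fun rec => rec.2.1) false)
        ↔ x.1 ∈ pvRegs sd := (hperm.map (fun rec => rec.2.1)).mem_iff
    rw [this]
  have hAnodup : (get_regional_sales_total sd).Nodup :=
    hAlt.imp (fun h he => absurd (he ▸ h) (lt_irrefl _))
  have hBnodup : (get_regional_sales_total_alt sd).Nodup :=
    hBlt.imp (fun h he => absurd (he ▸ h) (lt_irrefl _))
  have hABperm : (get_regional_sales_total sd).Perm (get_regional_sales_total_alt sd) :=
    (List.perm_ext_iff_of_nodup hAnodup hBnodup).mpr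
      (fun x => (hAmem x).trans (hBmem' x).symm)
  exact hABperm.eq_of_pairwise
    (fun a b _ _ h1 h2 => absurd h1 (asymm h2)) hAlt hBlt
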